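-- pv_equiv track=rewrite | github.com/AarushiSharma1515/WidthRaspberrypi5 | WidthCalculation.py | find_longest_continuous_run
-- ===== SOURCE A (Python) =====
-- def find_longest_continuous_run(row):
--     """
--     Finds the start, end, and length of the longest continuous run of non-zero pixels in a 1D array.
--     """
--     max_len = 0
--     max_start = -1
--     max_end = -1
--     current_len = 0
--     current_start = -1
--
--     for i, pixel in enumerate(row):
--         if pixel > 0:
--             if current_len == 0:
--                 current_start = i
--             current_len += 1
--         else:
--             if current_len > max_len:
--                 max_len = current_len
--                 max_start = current_start
--                 max_end = i - 1
--             current_len = 0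
--
--     if current_len > max_len:
--         max_len = current_len
--         max_start = current_start
--         max_end = len(row) - 1
--
--     return max_len, max_start, max_end
-- ===== SOURCE B (Python) =====
-- def find_longest_continuous_run(row):
--     """
--     Finds the start, end, and length of the longest continuous run of non-zero pixels in a 1D array.
--     Boundary-index method: collect the positions of all non-positive pixels (plus virtual
--     boundaries -1 and len(row)); each run is the gap between two consecutive boundaries,
--     so scan those gaps keeping the first strictly largest one.
--     """
--     bounds = [-1] + [i for i, p in enumerate(row) if p <= 0] + [len(row)]
--     best_len = 0
--     best_bound = -1
--     for a, b in zip(bounds, bounds[1:]):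
--         gap = b - a - 1
--         if gap > best_len:
--             best_len = gap
--             best_bound = a
--     if best_len == 0:
--         return 0, -1, -1
--     return best_len, best_bound + 1, best_bound + best_len
-- ===== Notes on version B (the rewrite author's own statement) =====
-- stated objective: alternative
-- what changed: Replaces A's five-variable per-pixel state machine (with its duplicated end-of-loop flush) by a boundary-index method: collect the positions of the non-positive pixels plus virtual boundaries -1 and len(row), then scan the gaps between consecutive boundaries keeping the first strictly largest gap and deriving start/end arithmetically.
import Mathlib
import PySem

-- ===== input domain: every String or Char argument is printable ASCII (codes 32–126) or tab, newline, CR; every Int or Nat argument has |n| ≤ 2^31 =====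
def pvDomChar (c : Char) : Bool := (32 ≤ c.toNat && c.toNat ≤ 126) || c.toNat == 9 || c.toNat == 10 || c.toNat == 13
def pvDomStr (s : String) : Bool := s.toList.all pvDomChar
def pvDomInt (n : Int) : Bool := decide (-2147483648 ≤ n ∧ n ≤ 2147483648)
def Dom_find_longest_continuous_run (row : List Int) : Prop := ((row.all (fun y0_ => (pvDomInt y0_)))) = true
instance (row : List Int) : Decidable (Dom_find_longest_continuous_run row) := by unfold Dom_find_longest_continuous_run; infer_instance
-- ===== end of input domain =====

-- B replaces A's per-pixel five-variable state machine by a boundary-index method: the positions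
-- of the non-positive pixels (plus virtual boundaries -1 and len) are collected first, and the
-- answer is the first largest gap between consecutive boundaries; objective: alternative.

-- ===== PORT A =====
-- the for-loop of A, element by element, over the state (max_len, max_start, max_end, current_len, current_start)
def pvAloop : List Int → Int → Int × Int × Int × Int × Int → Int × Int × Int × Int × Int
  | [], _, st => st
  | p :: rest, i, (ml, ms, me, cl, cs) =>
    if p > 0 then
      pvAloop rest (i + 1) (ml, ms, me, cl + 1, if cl = 0 then i else cs)
    else
      if cl > ml then pvAloop rest (i + 1) (cl, cs, i - 1, 0, cs)
      else pvAloop rest (i + 1) (ml, ms, me, 0, cs)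

def find_longest_continuous_run (row : List Int) : Int × Int × Int :=
  let (ml, ms, me, cl, cs) := pvAloop row 0 (0, -1, -1, 0, -1)
  if cl > ml then (cl, cs, (row.length : Int) - 1) else (ml, ms, me)

-- ===== PORT B =====
-- bounds = [-1] + [i for i, p in enumerate(row) if p <= 0] + [len(row)];
-- then the loop over zip(bounds, bounds[1:]) keeping the first strictly largest gap.
-- bounds is always nonempty, so bounds[1:] is exactly List.tail.
def find_longest_continuous_run_alt (row : List Int) : Int × Int × Int :=
  let bounds : List Int :=
    -1 :: (((PySem.List.enumerate row 0).filter (fun p => p.2 ≤ 0)).map (fun p => p.1)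
            ++ [(row.length : Int)])
  let best := (bounds.zip bounds.tail).foldl
    (fun (b : Int × Int) (ab : Int × Int) =>
      if ab.2 - ab.1 - 1 > b.1 then (ab.2 - ab.1 - 1, ab.1) else b) (0, -1)
  if best.1 = 0 then (0, -1, -1) else (best.1, best.2 + 1, best.2 + best.1)

-- ===== PRECONDITION & SPEC =====
def Spec_find_longest_continuous_run (row : List Int) (out : Int × Int × Int) : Prop := out = find_longest_continuous_run_alt row
instance (row : List Int) (out : Int × Int × Int) : Decidable (Spec_find_longest_continuous_run row out) := by unfold Spec_find_longest_continuous_run; infer_instance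

-- ===== CLAIM (what is proved, stated in full; the proofs are below) =====
def Claim_equal_find_longest_continuous_run : Prop := ∀ (row : List Int), Dom_find_longest_continuous_run row → Spec_find_longest_continuous_run row (find_longest_continuous_run row)

-- ===== LEMMAS AND PROOFS =====

-- positions of the non-positive elements of the list, counting from i (structural form of B's comprehension)
def pvZeros : List Int → Int → List Int
  | [], _ => []
  | x :: xs, i => if x ≤ 0 then i :: pvZeros xs (i + 1) else pvZeros xs (i + 1)

-- induction skeleton: splits the row into its maximal positive prefixes (only .induct is used)
def pvRuns : List Int → Int → List (Int × Int)
  | [], _ => []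
  | x :: xs, i =>
    if x > 0 then
      let l : Int := 1 + ((xs.takeWhile (fun p => 0 < p)).length : Int)
      (i, l) :: pvRuns (xs.dropWhile (fun p => 0 < p)) (i + l)
    else
      pvRuns xs (i + 1)
termination_by xs _ => xs.length
decreasing_by
  · exact Nat.lt_succ_of_le (List.length_dropWhile_le _ _)
  · simp

-- A's loop followed by its final flush, with the final index made explicit
def pvAfin (row : List Int) (i : Int) (st : Int × Int × Int × Int × Int) : Int × Int × Int :=
  let (ml, ms, me, cl, cs) := pvAloop row i st
  if cl > ml then (cl, cs, i + (row.length : Int) - 1) else (ml, ms, me)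

-- B's gap fold over a boundary list followed by its final shaping
def pvBshape (l : List Int) (b : Int × Int) : Int × Int × Int :=
  let best := (l.zip l.tail).foldl
    (fun (b : Int × Int) (ab : Int × Int) =>
      if ab.2 - ab.1 - 1 > b.1 then (ab.2 - ab.1 - 1, ab.1) else b) b
  if best.1 = 0 then (0, -1, -1) else (best.1, best.2 + 1, best.2 + best.1)

-- relation between A's (ml, ms, me) and B's accumulator b = (best_len, best_bound)
def pvR (ml ms me : Int) (b : Int × Int) : Prop :=
  0 ≤ ml ∧ b.1 = ml ∧ (ml = 0 → b.2 = -1 ∧ ms = -1 ∧ me = -1) ∧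
    (0 < ml → ms = b.2 + 1 ∧ me = b.2 + ml)

theorem pvBshape_cons (c1 c2 : Int) (L : List Int) (b : Int × Int) :
    pvBshape (c1 :: c2 :: L) b
      = pvBshape (c2 :: L) (if c2 - c1 - 1 > b.1 then (c2 - c1 - 1, c1) else b) := by
  simp only [pvBshape, List.tail_cons, List.zip_cons_cons, List.foldl_cons]

theorem pvBshape_single (c : Int) (b : Int × Int) :
    pvBshape [c] b = if b.1 = 0 then (0, -1, -1) else (b.1, b.2 + 1, b.2 + b.1) := by
  simp [pvBshape]

theorem pvR_shape (ml ms me : Int) (b : Int × Int) (h : pvR ml ms me b) :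
    (if b.1 = 0 then ((0 : Int), (-1 : Int), (-1 : Int)) else (b.1, b.2 + 1, b.2 + b.1))
      = (ml, ms, me) := by
  obtain ⟨hml, hb1, h0, hpos⟩ := h
  by_cases h : ml = 0
  · obtain ⟨h1, h2, h3⟩ := h0 h
    simp [hb1, h, h2, h3]
  · obtain ⟨h1, h2⟩ := hpos (by omega)
    simp [hb1, h, h1, h2]

theorem pvZeros_eq_filter : ∀ (row : List Int) (i : Int),
    ((PySem.List.enumerate row i).filter (fun p => p.2 ≤ 0)).map (fun p => p.1) = pvZeros row i := by
  intro row
  induction row with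
  | nil => intro i; simp [pvZeros, PySem.List.enumerate_nil]
  | cons x xs ih =>
    intro i
    rw [PySem.List.enumerate_cons]
    by_cases h : x ≤ 0
    · simp [pvZeros, h, List.filter, ih]
    · simp [pvZeros, h, List.filter, ih]

theorem pvAloop_pos (t : List Int) (ht : ∀ p ∈ t, 0 < p) :
    ∀ (rest : List Int) (i ml ms me cl cs : Int), 0 < cl →
    pvAloop (t ++ rest) i (ml, ms, me, cl, cs)
      = pvAloop rest (i + (t.length : Int)) (ml, ms, me, cl + (t.length : Int), cs) := by
  induction t with
  | nil => intro rest i ml ms me cl cs _; simp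
  | cons p t ih =>
    intro rest i ml ms me cl cs hcl
    have hp : 0 < p := ht p (by simp)
    have hcl' : ¬ cl = 0 := by omega
    simp only [List.cons_append, pvAloop, if_pos hp, if_neg hcl']
    rw [ih (fun q hq => ht q (by simp [hq])) rest (i + 1) ml ms me (cl + 1) cs (by omega)]
    simp only [List.length_cons]
    push_cast
    ring_nf

theorem pvZeros_pos (t : List Int) (ht : ∀ p ∈ t, 0 < p) :
    ∀ (rest : List Int) (i : Int), pvZeros (t ++ rest) i = pvZeros rest (i + (t.length : Int)) := by
  induction t with
  | nil => intro rest i; simp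
  | cons p t ih =>
    intro rest i
    have hp : ¬ p ≤ 0 := by have := ht p (by simp); omega
    simp only [List.cons_append, pvZeros, if_neg hp]
    rw [ih (fun q hq => ht q (by simp [hq])) rest (i + 1)]
    simp only [List.length_cons]
    push_cast
    ring_nf

theorem pvMain : ∀ (row : List Int) (i : Int), ∀ (ml ms me cs : Int) (b : Int × Int),
    pvR ml ms me b →
    pvAfin row i (ml, ms, me, 0, cs)
      = pvBshape ((i - 1) :: (pvZeros row i ++ [i + (row.length : Int)])) b := by
  intro row i
  induction row, i using pvRuns.induct with
  | case1 i =>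
    intro ml ms me cs b hR
    have hml : 0 ≤ ml := hR.1
    have hb1 : b.1 = ml := hR.2.1
    simp only [pvZeros, List.nil_append, List.length_nil, Nat.cast_zero, add_zero]
    rw [pvBshape_cons, if_neg (show ¬ (i - (i - 1) - 1 > b.1) by omega), pvBshape_single,
      pvR_shape ml ms me b hR]
    simp [pvAfin, pvAloop, show ¬ ((0 : Int) > ml) by omega]
  | case2 x xs i hx l ih =>
    -- x > 0 : a maximal positive group of length l = 1 + takeWhile length
    intro ml ms me cs b hR
    obtain ⟨hml, hb1, h0, hpos⟩ := hR
    set t := xs.takeWhile (fun p => 0 < p) with htdef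
    set d := xs.dropWhile (fun p => 0 < p) with hddef
    have hxs : xs = t ++ d := (List.takeWhile_append_dropWhile (p := fun p => (decide (0 < p))) (l := xs)).symm
    have htpos : ∀ p ∈ t, 0 < p := by
      intro p hp
      simpa using List.mem_takeWhile_imp hp
    have hlen : l = 1 + (t.length : Int) := rfl
    have hl1 : 1 ≤ l := by have : (0:Int) ≤ (t.length : Int) := by positivity
                           omega
    have hz : ∀ z d', d = z :: d' → ¬ z > 0 := by
      intro z d' hdc
      have := List.head?_dropWhile_not (p := fun p => (decide (0 < p))) (l := xs)
      rw [← hddef, hdc] at this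
      simpa using this
    -- unfold one step of A, then absorb the rest of the group
    have step1 : pvAloop (x :: xs) i (ml, ms, me, 0, cs)
        = pvAloop d (i + l) (ml, ms, me, l, i) := by
      simp only [pvAloop, if_pos hx, zero_add, if_true]
      rw [show xs = t ++ d from hxs]
      rw [pvAloop_pos t htpos d (i+1) ml ms me 1 i (by omega)]
      have e1 : i + 1 + (t.length : Int) = i + l := by rw [hlen]; ring
      have e2 : (1 : Int) + (t.length : Int) = l := by rw [hlen]
      rw [e1, e2]
    have hzeros : pvZeros (x :: xs) i = pvZeros d (i + l) := by
      have hxp : ¬ x ≤ 0 := by omega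
      simp only [pvZeros, if_neg hxp]
      rw [show xs = t ++ d from hxs, pvZeros_pos t htpos d (i + 1)]
      rw [show i + 1 + (t.length : Int) = i + l from by rw [hlen]; ring]
    have hrow_len : ((x :: xs).length : Int) = l + (d.length : Int) := by
      rw [hxs, hlen]
      simp only [List.length_cons, List.length_append]
      push_cast
      ring
    have hA : pvAfin (x :: xs) i (ml, ms, me, 0, cs) = pvAfin d (i + l) (ml, ms, me, l, i) := by
      simp only [pvAfin, step1]
      rw [show i + ((x :: xs).length : Int) - 1 = i + l + ((d.length : Int)) - 1 from by
        rw [hrow_len]; ring]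
    clear_value t d l
    clear htdef hddef
    rw [hA, hzeros, hrow_len, ← add_assoc]
    cases d with
    | nil =>
      -- the group runs to the end of the row: one boundary pair (i-1, i+l)
      simp only [pvZeros, List.nil_append, List.length_nil, Nat.cast_zero, add_zero]
      rw [pvBshape_cons, show (i + l) - (i - 1) - 1 = l from by ring, hb1, pvBshape_single]
      simp only [pvAfin, pvAloop, List.length_nil, Nat.cast_zero, add_zero]
      by_cases hgt : l > ml
      · rw [if_pos hgt, if_pos hgt]
        simp only [show ¬ l = 0 by omega, if_false, Prod.mk.injEq]
        exact ⟨trivial, by ring, by ring⟩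
      · rw [if_neg hgt, if_neg hgt, pvR_shape ml ms me b ⟨hml, hb1, h0, hpos⟩]
    | cons z d' =>
      -- the group is broken by z ≤ 0 at index i+l: A flushes there, B's fold absorbs the pair (i-1, i+l)
      have hzz : ¬ z > 0 := hz z d' rfl
      have hzzle : z ≤ 0 := by omega
      have hzeros2 : pvZeros (z :: d') (i + l) = (i + l) :: pvZeros d' (i + l + 1) := by
        simp [pvZeros, hzzle]
      -- A's flush at z, re-expressed as a fresh start (cl = 0) on z :: d'
      have hstep : pvAfin (z :: d') (i + l) (ml, ms, me, l, i)
          = if l > ml then pvAfin (z :: d') (i + l) (l, i, i + l - 1, 0, i)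
            else pvAfin (z :: d') (i + l) (ml, ms, me, 0, i) := by
        simp only [pvAfin, pvAloop, if_neg hzz, if_neg (show ¬ ((0:Int) > l) by omega),
          if_neg (show ¬ ((0:Int) > ml) by omega)]
        split_ifs <;> rfl
      -- a zero-width gap never updates the accumulator
      have habs : ∀ (acc : Int × Int), 0 ≤ acc.1 →
          pvBshape ((i + l - 1) :: (pvZeros (z :: d') (i + l) ++ [i + l + (((z :: d').length : Int))])) acc
            = pvBshape ((i + l) :: (pvZeros d' (i + l + 1) ++ [i + l + (((z :: d').length : Int))])) acc := by
        intro acc hacc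
        rw [hzeros2, List.cons_append, pvBshape_cons,
          if_neg (show ¬ ((i + l) - (i + l - 1) - 1 > acc.1) by omega)]
      rw [hstep, hzeros2, List.cons_append, pvBshape_cons,
        show (i + l) - (i - 1) - 1 = l from by ring, hb1]
      by_cases hgt : l > ml
      · rw [if_pos hgt, if_pos hgt,
          ih l i (i + l - 1) i (l, i - 1) ⟨by omega, rfl, by intro h; omega, by intro _; exact ⟨by ring, by ring⟩⟩,
          habs (l, i - 1) (by omega)]
      · rw [if_neg hgt, if_neg hgt, ih ml ms me i b ⟨hml, hb1, h0, hpos⟩, habs b (by omega)]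
  | case3 x xs i hx ih =>
    intro ml ms me cs b hR
    have hml : 0 ≤ ml := hR.1
    have hb1 : b.1 = ml := hR.2.1
    have hxle : x ≤ 0 := by omega
    have hstepA : pvAfin (x :: xs) i (ml, ms, me, 0, cs) = pvAfin xs (i + 1) (ml, ms, me, 0, cs) := by
      simp only [pvAfin, pvAloop, if_neg hx, if_neg (show ¬ ((0:Int) > ml) by omega)]
      rw [show i + ((x :: xs).length : Int) - 1 = i + 1 + ((xs.length : Int)) - 1 from by
        simp only [List.length_cons]; push_cast; ring]
    have hzeros : pvZeros (x :: xs) i = i :: pvZeros xs (i + 1) := by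
      simp [pvZeros, hxle]
    have hIH := ih ml ms me cs b hR
    rw [show (i : Int) + 1 - 1 = i from by ring] at hIH
    rw [hstepA, hIH, hzeros, List.cons_append, pvBshape_cons,
      if_neg (show ¬ (i - (i - 1) - 1 > b.1) by omega),
      show i + ((x :: xs).length : Int) = (i + 1) + ((xs.length : Int)) from by
        simp only [List.length_cons]; push_cast; ring]

-- ===== VERDICT (by name: the statement is the Claim_ definition above) =====
theorem find_longest_continuous_run_spec : Claim_equal_find_longest_continuous_run := by
  intro row _
  unfold Spec_find_longest_continuous_run
  have h := pvMain row 0 0 (-1) (-1) (-1) (0, -1)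
    ⟨le_refl 0, rfl, fun _ => ⟨rfl, rfl, rfl⟩, fun h => absurd h (by omega)⟩
  simp only [pvAfin, zero_add, show (0:Int) - 1 = -1 from by ring] at h
  unfold find_longest_continuous_run find_longest_continuous_run_alt
  rw [pvZeros_eq_filter row 0]
  simp only [pvBshape] at h
  exact h
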